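-- pv_equiv track=rewrite | github.com/haunglai/odpython | 11/Python 实现【服务失效判断】/Python 实现【服务失效判断】.py | is_normal
-- ===== SOURCE A (Python) =====
-- def is_normal(matrix, errors):
--     temp = errors
--     for error in errors:
--         if error not in matrix.keys():
--             continue
--         else:
--             for value in matrix[error]:
--                 if value not in temp:
--                     temp.append(value)
--     if errors != temp:
--         is_normal(matrix, temp)
--     else:
--         return errors
-- ===== SOURCE B (Python) =====
-- def is_normal(matrix, errors):
--     # Level-synchronous BFS: expand whole frontiers in staged rounds, building a
--     # fresh result list (no in-place mutation of `errors`, unlike A); a hash set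
--     # gives O(1) membership.
--     out = list(errors)
--     seen = set(out)
--     frontier = out
--     while frontier:
--         nxt = []
--         for e in frontier:
--             for v in matrix.get(e, ()):
--                 if v not in seen:
--                     seen.add(v)
--                     nxt.append(v)
--         out = out + nxt
--         frontier = nxt
--     return out
-- ===== Notes on version B (the rewrite author's own statement) =====
-- stated objective: faster
-- what changed: Replaces A's single index scan over one growing, in-place-mutated list (with O(n) list membership and a dead fixpoint recursion) by a pure level-synchronous BFS: whole frontiers are expanded in staged rounds into fresh per-level lists, with a hash set for O(1) membership; B does not mutate `errors`.
import Mathlib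
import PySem

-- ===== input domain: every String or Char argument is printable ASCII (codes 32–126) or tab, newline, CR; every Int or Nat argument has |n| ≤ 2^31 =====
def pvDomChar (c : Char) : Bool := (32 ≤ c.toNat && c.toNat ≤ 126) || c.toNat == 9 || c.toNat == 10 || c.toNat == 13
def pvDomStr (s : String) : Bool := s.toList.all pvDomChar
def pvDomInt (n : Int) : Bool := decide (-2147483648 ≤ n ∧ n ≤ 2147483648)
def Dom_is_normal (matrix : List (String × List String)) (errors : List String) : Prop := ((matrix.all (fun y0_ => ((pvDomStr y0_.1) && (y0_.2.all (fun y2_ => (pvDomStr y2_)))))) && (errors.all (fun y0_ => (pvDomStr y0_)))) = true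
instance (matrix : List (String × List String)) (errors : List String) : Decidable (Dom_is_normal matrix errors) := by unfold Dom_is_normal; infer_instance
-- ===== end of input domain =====

-- B replaces A's index scan over one growing in-place-mutated list by a pure
-- level-synchronous BFS (staged frontier rounds, set membership).  Python A mutates
-- `errors` in place while B does not; the equivalence proved here is about the
-- return value.

-- all strings occurring as a value in the adjacency dict; only yet-unseen such strings
-- can ever be appended, which bounds both loops (termination measure)
def pvVals (matrix : List (String × List String)) : List String :=
  matrix.flatMap Prod.snd

def pvUnseen (matrix : List (String × List String)) (es : List String) : Nat :=
  ((pvVals matrix).filter (fun v => !es.contains v)).length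

-- one inner-loop step of A: `if value not in temp: temp.append(value)`
def pvStepA (acc : List String) (v : String) : List String :=
  if acc.contains v then acc else acc ++ [v]

-- one inner-loop step of B: `if v not in seen: seen.add(v); nxt.append(v)`
def pvStepB (p : PySem.Set String × List String) (v : String) :
    PySem.Set String × List String :=
  if PySem.Set.contains p.1 v then p else (PySem.Set.add p.1 v, p.2 ++ [v])

-- one frontier element of B: `for v in matrix.get(e, ()): …`
def pvLevelStep (matrix : List (String × List String))
    (p : PySem.Set String × List String) (e : String) :
    PySem.Set String × List String :=
  (((PySem.Dict.mk matrix).get? e).getD []).foldl pvStepB p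

-- ---- termination lemmas (about the measure only), cited by the ports ----
theorem pvFoldA_facts (vs : List String) :
    ∀ es : List String,
      (∀ x, x ∈ es → x ∈ vs.foldl pvStepA es) ∧
      (vs.foldl pvStepA es = es ∨ ∃ v, v ∈ vs ∧ v ∉ es ∧ v ∈ vs.foldl pvStepA es) := by
  induction vs with
  | nil => intro es; exact ⟨fun x hx => hx, Or.inl rfl⟩
  | cons v rest ih =>
    intro es
    simp only [List.foldl_cons]
    by_cases hc : es.contains v = true
    · have hm : v ∈ es := List.contains_iff_mem.mp hc
      rw [show pvStepA es v = es by simp [pvStepA, hm]]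
      rcases ih es with ⟨h1, h2⟩
      refine ⟨h1, ?_⟩
      rcases h2 with h | ⟨w, hw1, hw2, hw3⟩
      · exact Or.inl h
      · exact Or.inr ⟨w, List.mem_cons_of_mem _ hw1, hw2, hw3⟩
    · have hm : v ∉ es := fun m => hc (List.contains_iff_mem.mpr m)
      rw [show pvStepA es v = es ++ [v] by simp [pvStepA, hm]]
      rcases ih (es ++ [v]) with ⟨h1, _⟩
      refine ⟨fun x hx => h1 x (List.mem_append_left _ hx), ?_⟩
      refine Or.inr ⟨v, List.mem_cons_self .., ?_,
        h1 v (List.mem_append_right _ (List.mem_singleton.mpr rfl))⟩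
      exact hm

theorem pvFoldB_facts (vs : List String) :
    ∀ (seen : PySem.Set String) (es : List String),
      (∀ x, x ∈ seen → x ∈ (vs.foldl pvStepB (seen, es)).1) ∧
      (vs.foldl pvStepB (seen, es) = (seen, es) ∨
        ∃ v, v ∈ vs ∧ v ∉ seen ∧ v ∈ (vs.foldl pvStepB (seen, es)).1) := by
  induction vs with
  | nil => intro seen es; exact ⟨fun x hx => hx, Or.inl rfl⟩
  | cons v rest ih =>
    intro seen es
    simp only [List.foldl_cons]
    by_cases hc : PySem.Set.contains seen v = true
    · have hm : v ∈ seen := List.contains_iff_mem.mp hc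
      rw [show pvStepB (seen, es) v = (seen, es) by simp [pvStepB, PySem.Set.contains, hm]]
      rcases ih seen es with ⟨h1, h2⟩
      refine ⟨h1, ?_⟩
      rcases h2 with h | ⟨w, hw1, hw2, hw3⟩
      · exact Or.inl h
      · exact Or.inr ⟨w, List.mem_cons_of_mem _ hw1, hw2, hw3⟩
    · have hm : v ∉ seen := fun m => hc (List.contains_iff_mem.mpr m)
      rw [show pvStepB (seen, es) v = (seen ++ [v], es ++ [v]) by
        simp [pvStepB, PySem.Set.contains, PySem.Set.add, hm]]
      rcases ih (seen ++ [v]) (es ++ [v]) with ⟨h1, _⟩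
      refine ⟨fun x hx => h1 x (List.mem_append_left _ hx), ?_⟩
      refine Or.inr ⟨v, List.mem_cons_self .., ?_,
        h1 v (List.mem_append_right _ (List.mem_singleton.mpr rfl))⟩
      exact hm

theorem pvUnseen_lt (matrix : List (String × List String)) (es es' : List String)
    (hsub : ∀ x, x ∈ es → x ∈ es') (v : String) (hv : v ∈ pvVals matrix)
    (hnot : v ∉ es) (hin : v ∈ es') : pvUnseen matrix es' < pvUnseen matrix es := by
  have hsubl : List.Sublist ((pvVals matrix).filter (fun v => !es'.contains v))
      ((pvVals matrix).filter (fun v => !es.contains v)) := by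
    apply List.monotone_filter_right
    intro a ha
    simp only [Bool.not_eq_true', List.contains_eq_mem, decide_eq_false_iff_not] at ha ⊢
    exact fun hm => ha (hsub a hm)
  rcases lt_or_eq_of_le hsubl.length_le with h | h
  · exact h
  · exfalso
    have heq := hsubl.eq_of_length h
    have hv1 : v ∈ (pvVals matrix).filter (fun v => !es.contains v) := by
      simp only [List.mem_filter, Bool.not_eq_true', List.contains_eq_mem,
        decide_eq_false_iff_not]
      exact ⟨hv, hnot⟩
    rw [← heq] at hv1
    simp only [List.mem_filter, Bool.not_eq_true', List.contains_eq_mem,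
      decide_eq_false_iff_not] at hv1
    exact hv1.2 hin

theorem pvVals_of_get? (matrix : List (String × List String)) (k : String) (vs : List String)
    (h : (PySem.Dict.mk matrix).get? k = some vs) : ∀ v ∈ vs, v ∈ pvVals matrix := by
  induction matrix with
  | nil => simp [PySem.Dict.get?] at h
  | cons p rest ih =>
    rw [PySem.Dict.get?_mk_cons] at h
    by_cases hk : (p.1 == k) = true
    · rw [if_pos hk] at h
      intro v hv
      simp only [pvVals, List.flatMap_cons, List.mem_append]
      exact Or.inl (by rw [← Option.some.inj h] at hv; exact hv)
    · rw [if_neg hk] at h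
      intro v hv
      simp only [pvVals, List.flatMap_cons, List.mem_append]
      exact Or.inr (ih h v hv)

-- facts about one whole frontier round of B, cited by B's termination proof
theorem pvLevelFold_facts (matrix : List (String × List String)) (f : List String) :
    ∀ (seen : PySem.Set String) (nxt : List String),
      (∀ x, x ∈ seen → x ∈ (f.foldl (pvLevelStep matrix) (seen, nxt)).1) ∧
      (f.foldl (pvLevelStep matrix) (seen, nxt) = (seen, nxt) ∨
        ∃ v, v ∈ pvVals matrix ∧ v ∉ seen ∧
          v ∈ (f.foldl (pvLevelStep matrix) (seen, nxt)).1) := by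
  induction f with
  | nil => intro seen nxt; exact ⟨fun x hx => hx, Or.inl rfl⟩
  | cons e rest ih =>
    intro seen nxt
    simp only [List.foldl_cons]
    rcases hmo : (PySem.Dict.mk matrix).get? e with _ | vs
    · rw [show pvLevelStep matrix (seen, nxt) e = (seen, nxt) by
        simp [pvLevelStep, hmo]]
      exact ih seen nxt
    · rw [show pvLevelStep matrix (seen, nxt) e = vs.foldl pvStepB (seen, nxt) by
        simp [pvLevelStep, hmo]]
      rcases pvFoldB_facts vs seen nxt with ⟨h1, h2⟩
      rcases h2 with heq | ⟨v, hv1, hv2, hv3⟩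
      · rw [heq]; exact ih seen nxt
      · rcases ih (vs.foldl pvStepB (seen, nxt)).1 (vs.foldl pvStepB (seen, nxt)).2 with
          ⟨ih1, _⟩
        refine ⟨fun x hx => ih1 x (h1 x hx), Or.inr ⟨v, pvVals_of_get? matrix e vs hmo v hv1,
          hv2, ih1 v hv3⟩⟩

-- ===== PORT A =====
-- Python's `for error in errors` iterates the live list object while the body appends to
-- it (temp aliases errors), so it is an index loop over the growing list; the trailing
-- `if errors != temp` compares the object with itself and is always False, so the
-- recursive branch never runs and the function returns errors.
def isNormalLoop (matrix : List (String × List String)) (es : List String) (i : Nat) :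
    List String :=
  if h : i < es.length then
    let es' := match (PySem.Dict.mk matrix).get? es[i] with
      | none => es                      -- error not in matrix.keys(): continue
      | some vs => vs.foldl pvStepA es  -- for value in matrix[error]: …
    isNormalLoop matrix es' (i + 1)
  else es
termination_by (pvUnseen matrix es, es.length - i)
decreasing_by
  rcases hmo : (PySem.Dict.mk matrix).get? es[i] with _ | vs
  · refine Prod.Lex.right _ ?_
    show es.length - (i + 1) < es.length - i
    omega
  · show Prod.Lex _ _ (pvUnseen matrix (vs.foldl pvStepA es),
      (vs.foldl pvStepA es).length - (i + 1)) (pvUnseen matrix es, es.length - i)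
    rcases pvFoldA_facts vs es with ⟨h1, h2⟩
    rcases h2 with heq | ⟨v, hv1, hv2, hv3⟩
    · rw [heq]; exact Prod.Lex.right _ (by omega)
    · exact Prod.Lex.left _ _
        (pvUnseen_lt matrix es _ h1 v (pvVals_of_get? matrix _ vs hmo v hv1) hv2 hv3)

def is_normal (matrix : List (String × List String)) (errors : List String) : List String :=
  isNormalLoop matrix errors 0

-- ===== PORT B =====
-- `while frontier: nxt = []; for e in frontier: for v in matrix.get(e, ()): …;
--  out = out + nxt; frontier = nxt`
def isNormalAltLevel (matrix : List (String × List String)) (seen : PySem.Set String)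
    (out frontier : List String) : List String :=
  if hf : frontier = [] then out
  else
    let q := frontier.foldl (pvLevelStep matrix) (seen, [])
    isNormalAltLevel matrix q.1 (out ++ q.2) q.2
termination_by (pvUnseen matrix seen, frontier.length)
decreasing_by
  simp only [List.foldl_attach]
  rcases pvLevelFold_facts matrix frontier seen [] with ⟨h1, h2⟩
  rcases h2 with heq | ⟨v, hv1, hv2, hv3⟩
  · rw [heq]
    refine Prod.Lex.right _ ?_
    show (0 : Nat) < frontier.length
    cases frontier with
    | nil => exact absurd rfl hf
    | cons a l => simp
  · exact Prod.Lex.left _ _ (pvUnseen_lt matrix seen _ h1 v hv1 hv2 hv3)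

def is_normal_alt (matrix : List (String × List String)) (errors : List String) :
    List String :=
  isNormalAltLevel matrix (PySem.Set.ofList errors) errors errors

-- ===== PRECONDITION & SPEC =====
def Spec_is_normal (matrix : List (String × List String)) (errors : List String) (out : List String) : Prop := out = is_normal_alt matrix errors
instance (matrix : List (String × List String)) (errors : List String) (out : List String) : Decidable (Spec_is_normal matrix errors out) := by unfold Spec_is_normal; infer_instance

-- ===== CLAIM (what is proved, stated in full; the proofs are below) =====
def Claim_equal_is_normal : Prop := ∀ (matrix : List (String × List String)) (errors : List String), Dom_is_normal matrix errors → Spec_is_normal matrix errors (is_normal matrix errors)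

-- ===== LEMMAS AND PROOFS =====

-- the two inner folds append the same new suffix and keep `seen` = membership of A's list
theorem pvFoldAB (vs : List String) :
    ∀ (seen : PySem.Set String) (es nxt : List String),
      (∀ x : String, x ∈ seen ↔ x ∈ es) →
      ∃ d, vs.foldl pvStepA es = es ++ d ∧
        (vs.foldl pvStepB (seen, nxt)).2 = nxt ++ d ∧
        (∀ x : String, x ∈ (vs.foldl pvStepB (seen, nxt)).1 ↔ x ∈ es ++ d) := by
  induction vs with
  | nil => intro seen es nxt hinv; exact ⟨[], by simp, by simp, by simpa using hinv⟩
  | cons v rest ih =>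
    intro seen es nxt hinv
    simp only [List.foldl_cons]
    by_cases hc : v ∈ es
    · have hmS : v ∈ seen := (hinv v).mpr hc
      rw [show pvStepA es v = es by simp [pvStepA, hc],
        show pvStepB (seen, nxt) v = (seen, nxt) by simp [pvStepB, PySem.Set.contains, hmS]]
      exact ih seen es nxt hinv
    · have hmS : v ∉ seen := fun m => hc ((hinv v).mp m)
      rw [show pvStepA es v = es ++ [v] by simp [pvStepA, hc],
        show pvStepB (seen, nxt) v = (seen ++ [v], nxt ++ [v]) by
          simp [pvStepB, PySem.Set.add, PySem.Set.contains, hmS]]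
      have hinv' : ∀ x : String, x ∈ seen ++ [v] ↔ x ∈ es ++ [v] := by
        intro x
        simp only [List.mem_append, List.mem_singleton]
        exact or_congr (hinv x) Iff.rfl
      rcases ih (seen ++ [v]) (es ++ [v]) (nxt ++ [v]) hinv' with ⟨d, h1, h2, h3⟩
      refine ⟨[v] ++ d, by simpa using h1, by simpa using h2, ?_⟩
      intro x
      rw [h3 x]
      simp

-- one whole frontier round of B corresponds to A advancing over exactly those indices
theorem pvLevel_agree (matrix : List (String × List String)) (f : List String) :
    ∀ (es : List String) (i : Nat) (seen : PySem.Set String) (nxt : List String),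
      (∀ x : String, x ∈ seen ↔ x ∈ es) →
      es.drop i = f ++ nxt →
      ∃ d, isNormalLoop matrix es i = isNormalLoop matrix (es ++ d) (i + f.length) ∧
        (f.foldl (pvLevelStep matrix) (seen, nxt)).2 = nxt ++ d ∧
        (∀ x : String, x ∈ (f.foldl (pvLevelStep matrix) (seen, nxt)).1 ↔ x ∈ es ++ d) := by
  induction f with
  | nil => intro es i seen nxt hinv _; exact ⟨[], by simp, by simp, by simpa using hinv⟩
  | cons e rest ih =>
    intro es i seen nxt hinv hdrop
    have hi : i < es.length := by
      by_contra h
      rw [List.drop_eq_nil_of_le (by omega)] at hdrop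
      exact (List.cons_ne_nil _ _) hdrop.symm
    have hcons : es.drop i = es[i] :: es.drop (i + 1) := List.drop_eq_getElem_cons hi
    rw [hcons] at hdrop
    have hei : es[i] = e := (List.cons.inj hdrop).1
    have hdrop1 : es.drop (i + 1) = rest ++ nxt := (List.cons.inj hdrop).2
    rw [isNormalLoop]
    simp only [dif_pos hi, List.foldl_cons]
    rcases hmo : (PySem.Dict.mk matrix).get? es[i] with _ | vs
    · -- continue: A keeps es; B's pvLevelStep is the identity
      have hstep : pvLevelStep matrix (seen, nxt) e = (seen, nxt) := by
        rw [← hei]; simp [pvLevelStep, hmo]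
      rw [hstep]
      rcases ih es (i + 1) seen nxt hinv hdrop1 with ⟨d, h1, h2, h3⟩
      refine ⟨d, ?_, h2, h3⟩
      show isNormalLoop matrix es (i + 1) = _
      rw [h1]
      congr 1
      simp only [List.length_cons]
      omega
    · have hstep : pvLevelStep matrix (seen, nxt) e = vs.foldl pvStepB (seen, nxt) := by
        rw [← hei]; simp [pvLevelStep, hmo]
      rw [hstep]
      rcases pvFoldAB vs seen es nxt hinv with ⟨d1, hA, hB, hI⟩
      have hdrop2 : (es ++ d1).drop (i + 1) = rest ++ ((vs.foldl pvStepB (seen, nxt)).2) := by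
        rw [List.drop_append_of_le_length (by omega), hdrop1, hB]
        simp
      rcases ih (es ++ d1) (i + 1) (vs.foldl pvStepB (seen, nxt)).1
          (vs.foldl pvStepB (seen, nxt)).2 hI hdrop2 with ⟨d2, h1, h2, h3⟩
      refine ⟨d1 ++ d2, ?_, ?_, ?_⟩
      · show isNormalLoop matrix (vs.foldl pvStepA es) (i + 1) = _
        rw [hA, h1, ← List.append_assoc]
        congr 1
        simp only [List.length_cons]
        omega
      · rw [h2, hB]; simp
      · intro x; rw [h3 x]; simp

-- B's level loop, started at the frontier `out.drop i`, computes A's loop from index i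
theorem pvAlt_eq_loop (matrix : List (String × List String)) :
    ∀ (seen : PySem.Set String) (out frontier : List String),
      (∀ x : String, x ∈ seen ↔ x ∈ out) →
      ∀ i : Nat, frontier = out.drop i →
        isNormalAltLevel matrix seen out frontier = isNormalLoop matrix out i := by
  intro seen out frontier
  induction seen, out, frontier using isNormalAltLevel.induct matrix with
  | case1 seen out =>
    intro _ i hdrop
    have hlen : ¬ i < out.length := by
      have := List.drop_eq_nil_iff.mp hdrop.symm
      omega
    rw [isNormalAltLevel, isNormalLoop]
    simp [hlen]
  | case2 seen out frontier hf q ih =>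
    intro hinv i hdrop
    have hq : q = frontier.foldl (pvLevelStep matrix) (seen, []) := by
      simp only [q, List.foldl_attach]
    rw [hq] at ih
    have hfl : i < out.length := by
      by_contra h
      exact hf (by rw [hdrop, List.drop_eq_nil_of_le (by omega)])
    rcases pvLevel_agree matrix frontier out i seen [] hinv (by rw [hdrop]; simp)
        with ⟨d, h1, h2, h3⟩
    have hq2 : (frontier.foldl (pvLevelStep matrix) (seen, [])).2 = d := by simpa using h2
    have hflen : i + frontier.length = out.length := by
      have := congrArg List.length hdrop
      simp [List.length_drop] at this
      omega
    rw [isNormalAltLevel]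
    simp only [dif_neg hf]
    rw [ih (by simpa [hq2] using h3) out.length (by simp [hq2]), h1, hq2, hflen]

-- ===== VERDICT (by name: the statement is the Claim_ definition above) =====
theorem is_normal_spec : Claim_equal_is_normal := by
  intro matrix errors _
  unfold Spec_is_normal is_normal is_normal_alt
  refine (pvAlt_eq_loop matrix (PySem.Set.ofList errors) errors errors ?_ 0 (by simp)).symm
  intro x
  simp [PySem.Set.mem_ofList]
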